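-- pv_equiv track=rewrite | github.com/dsesto/advent-of-code-2023 | advent_calendar/day_10/day10.py | cover_areas
-- ===== SOURCE A (Python) =====
-- from typing import List, Tuple, Optional
--
-- def cover_areas(maze: List[List[str]]) -> int:
--     """
--     Paint areas as O (Outside) or I (Inside) depending on whether points are outside or inside the shape.
--     To determine whether a point is O or I, we can make use of parity. If an odd amount of walls (|, J, L) was found
--     before reaching the point ".", it will be an I; if the amount is even, it will be an O.
--     """
--     i_found = 0
--     for row_idx, row in enumerate(maze):
--         num_walls_seen = 0
--         for col_idx, c in enumerate(row):
--             if c in ("|", "L", "J"):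
--                 num_walls_seen += 1
--             elif c == ".":
--                 if num_walls_seen % 2 == 0:
--                     maze[row_idx][col_idx] = "O"
--                 else:
--                     maze[row_idx][col_idx] = "I"
--                     i_found += 1
--
--     return i_found
-- ===== SOURCE B (Python) =====
-- def cover_areas(maze):
--     """Per-cell recount: a '.' cell is Inside iff the number of wall
--     characters ('|','L','J') strictly before it in its row is odd.
--     Pure count: unlike A, this does not mutate maze (return value only)."""
--     walls = ("|", "L", "J")
--     total = 0
--     for row in maze:
--         for col_idx, c in enumerate(row):
--             if c == "." and sum(x in walls for x in row[:col_idx]) % 2 == 1: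
--                 total += 1
--     return total
-- ===== Notes on version B (the rewrite author's own statement) =====
-- stated objective: simpler
-- what changed: Replaces the running wall-parity accumulator and in-place O/I painting with a stateless per-cell prefix recount: each '.' cell independently counts walls in row[:col_idx] and contributes 1 when that count is odd; maze is not mutated (return value equivalence).
import Mathlib
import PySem

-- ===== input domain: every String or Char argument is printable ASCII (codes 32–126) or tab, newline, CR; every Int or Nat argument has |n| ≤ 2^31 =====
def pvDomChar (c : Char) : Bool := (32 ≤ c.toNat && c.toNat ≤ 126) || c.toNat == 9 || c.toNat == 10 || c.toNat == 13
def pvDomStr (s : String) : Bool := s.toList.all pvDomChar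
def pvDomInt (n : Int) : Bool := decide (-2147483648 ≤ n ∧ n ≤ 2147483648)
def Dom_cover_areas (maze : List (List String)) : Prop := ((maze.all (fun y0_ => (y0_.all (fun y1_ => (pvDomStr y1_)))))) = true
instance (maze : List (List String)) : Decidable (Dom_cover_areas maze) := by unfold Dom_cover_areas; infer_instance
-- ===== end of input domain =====

-- B replaces A's running parity with an independent prefix recount per '.' cell.
-- A mutates maze in place (paints 'O'/'I'); B does not — equivalence is about the return value.
-- ===== PORT A =====
-- inner loop of A: state = (num_walls_seen, i_found accumulator)
def coverRowA : List String → Nat → Int → Int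
  | [], _, acc => acc
  | c :: rest, w, acc =>
    if c = "|" ∨ c = "L" ∨ c = "J" then coverRowA rest (w + 1) acc
    else if c = "." then
      if w % 2 = 0 then coverRowA rest w acc
      else coverRowA rest w (acc + 1)
    else coverRowA rest w acc

def cover_areas (maze : List (List String)) : Int :=
  maze.foldl (fun acc row => coverRowA row 0 acc) 0

-- ===== PORT B =====
def isWallB (c : String) : Bool := c == "|" || c == "L" || c == "J"

-- sum(1 for col_idx, c in enumerate(row) if c == "." and sum(x in walls for x in row[:col_idx]) % 2 == 1)
def rowInsideB (row : List String) : Int :=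
  (PySem.List.enumerate row).foldl
    (fun acc p =>
      if p.2 = "." ∧ ((PySem.List.slice row none (some p.1)).countP isWallB) % 2 = 1 then acc + 1
      else acc) 0

def cover_areas_alt (maze : List (List String)) : Int :=
  maze.foldl (fun acc row => acc + rowInsideB row) 0

-- ===== PRECONDITION & SPEC =====
def Spec_cover_areas (maze : List (List String)) (out : Int) : Prop := out = cover_areas_alt maze
instance (maze : List (List String)) (out : Int) : Decidable (Spec_cover_areas maze out) := by unfold Spec_cover_areas; infer_instance

-- ===== CLAIM (what is proved, stated in full; the proofs are below) =====
def Claim_equal_cover_areas : Prop := ∀ (maze : List (List String)), Dom_cover_areas maze → Spec_cover_areas maze (cover_areas maze)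

-- ===== LEMMAS AND PROOFS =====
lemma isWallB_dot : isWallB "." = false := by rfl

-- reference count: inside-cells of a row given w walls already seen
def nInside : List String → Nat → Int
  | [], _ => 0
  | c :: rest, w =>
    if isWallB c then nInside rest (w + 1)
    else (if c = "." ∧ w % 2 = 1 then 1 else 0) + nInside rest w

lemma coverRowA_eq_nInside : ∀ (row : List String) (w : Nat) (acc : Int),
    coverRowA row w acc = acc + nInside row w := by
  intro row
  induction row with
  | nil => intro w acc; simp [coverRowA, nInside]
  | cons c rest ih =>
    intro w acc
    by_cases hw : c = "|" ∨ c = "L" ∨ c = "J"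
    · have hwb : isWallB c = true := by
        rcases hw with h | h | h <;> simp [isWallB, h]
      have hdot : ¬ c = "." := by rcases hw with h | h | h <;> simp [h]
      simp [coverRowA, nInside, hw, hwb, ih]
    · have hw2 := hw
      rw [not_or, not_or] at hw2
      have hwb : isWallB c = false := by
        simp [isWallB, hw2.1, hw2.2.1, hw2.2.2]
      by_cases hdot : c = "."
      · by_cases hp : w % 2 = 0
        · simp [coverRowA, nInside, hdot, hp, isWallB_dot, ih]
        · have hp1 : w % 2 = 1 := by omega
          simp [coverRowA, nInside, hdot, hp1, isWallB_dot, ih]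
          ring
      · simp [coverRowA, nInside, hw, hwb, hdot, ih]

lemma rowInsideB_gen : ∀ (rest pre : List String) (a : Int),
    (PySem.List.enumerate rest (pre.length : Int)).foldl
      (fun acc p =>
        if p.2 = "." ∧ ((PySem.List.slice (pre ++ rest) none (some p.1)).countP isWallB) % 2 = 1
        then acc + 1 else acc) a
    = a + nInside rest (pre.countP isWallB) := by
  intro rest
  induction rest with
  | nil => intro pre a; simp [PySem.List.enumerate_nil, nInside]
  | cons c rest ih =>
    intro pre a
    rw [PySem.List.enumerate_cons]
    simp only [List.foldl_cons]
    have hslice : PySem.List.slice (pre ++ c :: rest) none (some (pre.length : Int)) = pre := by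
      rw [PySem.List.slice_to_natCast]
      exact List.take_left
    have hlen : ((pre.length : Int) + 1) = (((pre ++ [c]).length : Nat) : Int) := by
      simp
    have happ : pre ++ c :: rest = (pre ++ [c]) ++ rest := by simp
    rw [hslice, hlen, happ] at *
    rw [ih (pre ++ [c])]
    by_cases hwb : isWallB c
    · have hdot : ¬ c = "." := by
        intro h; rw [h] at hwb; simp [isWallB_dot] at hwb
      have hcnt : (pre ++ [c]).countP isWallB = pre.countP isWallB + 1 := by
        simp [List.countP_append, hwb]
      simp [hdot, nInside, hwb, hcnt]
    · have hcnt : (pre ++ [c]).countP isWallB = pre.countP isWallB := by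
        simp [List.countP_append, hwb]
      rw [hcnt]
      by_cases hc : c = "." ∧ (pre.countP isWallB) % 2 = 1
      · simp [hc, nInside, isWallB_dot]; ring
      · simp only [nInside]
        rw [if_neg hwb, if_neg hc]
        by_cases hdot : c = "."
        · have : ¬ ((pre.countP isWallB) % 2 = 1) := fun h => hc ⟨hdot, h⟩
          simp [hdot, this]
        · simp [hdot]

lemma rowInsideB_eq (row : List String) : rowInsideB row = nInside row 0 := by
  have := rowInsideB_gen row [] 0
  simpa [rowInsideB, PySem.List.enumerate] using this

lemma fold_eq : ∀ (maze : List (List String)) (acc : Int),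
    maze.foldl (fun acc row => coverRowA row 0 acc) acc
      = maze.foldl (fun acc row => acc + rowInsideB row) acc := by
  intro maze
  induction maze with
  | nil => intro acc; rfl
  | cons r rs ih =>
    intro acc
    simp only [List.foldl_cons, coverRowA_eq_nInside, rowInsideB_eq]

-- ===== VERDICT (by name: the statement is the Claim_ definition above) =====
theorem cover_areas_spec : Claim_equal_cover_areas := by
  intro maze _
  unfold Spec_cover_areas cover_areas cover_areas_alt
  exact fold_eq maze 0
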